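-- pv_equiv track=rewrite | github.com/paulin011/Genossenschafte-latex | table_extraction/csv_to_latex.py | group_rows_by_structure
-- ===== SOURCE A (Python) =====
-- def group_rows_by_structure(rows):
--     """
--     Group rows to create proper multirow structure
--     """
--     grouped = []
--     current_gruppe = None
--     current_ordnung = None
--     gruppe_rows = []
--     ordnung_rows = []
--
--     for row in rows[1:]:  # Skip header
--         merkmalsgruppe, ordnungsmerkmal, einzelmerkmal, auspragungen, mischformen = row
--
--         # New Merkmalsgruppe
--         if merkmalsgruppe and merkmalsgruppe != current_gruppe:
--             # Finalize previous group
--             if current_gruppe: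
--                 if ordnung_rows:
--                     gruppe_rows.append((current_ordnung, ordnung_rows))
--                 grouped.append((current_gruppe, gruppe_rows))
--
--             # Start new group
--             current_gruppe = merkmalsgruppe
--             current_ordnung = ordnungsmerkmal
--             gruppe_rows = []
--             ordnung_rows = []
--
--         # New Ordnungsmerkmal within same group
--         elif ordnungsmerkmal and ordnungsmerkmal != current_ordnung:
--             # Finalize previous ordnung
--             if ordnung_rows:
--                 gruppe_rows.append((current_ordnung, ordnung_rows))
--
--             # Start new ordnung
--             current_ordnung = ordnungsmerkmal
--             ordnung_rows = []
--
--         # Add current row to ordnung_rows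
--         ordnung_rows.append((einzelmerkmal, auspragungen, mischformen))
--
--     # Finalize last group
--     if current_gruppe:
--         if ordnung_rows:
--             gruppe_rows.append((current_ordnung, ordnung_rows))
--         grouped.append((current_gruppe, gruppe_rows))
--
--     return grouped
-- ===== SOURCE B (Python) =====
-- def group_rows_by_structure(rows):
--     """
--     Group rows to create proper multirow structure
--     """
--     # Pass 1: forward-fill gruppe/ordnung labels; rows before any gruppe are dropped.
--     labeled = []
--     gruppe = None
--     ordnung = None
--     for row in rows[1:]:  # Skip header
--         merkmalsgruppe, ordnungsmerkmal, einzelmerkmal, auspragungen, mischformen = row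
--         if merkmalsgruppe and merkmalsgruppe != gruppe:
--             gruppe = merkmalsgruppe
--             ordnung = ordnungsmerkmal
--         elif ordnungsmerkmal and ordnungsmerkmal != ordnung:
--             ordnung = ordnungsmerkmal
--         if gruppe:
--             labeled.append((gruppe, ordnung, (einzelmerkmal, auspragungen, mischformen)))
--     # Pass 2: group consecutive equal labels into the nested structure.
--     grouped = []
--     for g, o, data in labeled:
--         if not grouped or grouped[-1][0] != g:
--             grouped.append((g, []))
--         buckets = grouped[-1][1]
--         if not buckets or buckets[-1][0] != o:
--             buckets.append((o, []))
--         buckets[-1][1].append(data)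
--     return grouped
-- ===== Notes on version B (the rewrite author's own statement) =====
-- stated objective: alternative
-- what changed: Replaces A's single state machine with deferred finalization (pending group/ordnung buffers flushed at boundaries and at the end) by two passes: a labeling pass that forward-fills the gruppe/ordnung keys onto each kept row, then a grouping pass that merges consecutive equal keys into the nested structure, with no end-of-loop flush logic.
-- outside the precondition, e.g. on group_rows_by_structure([['h', 'h', 'h', 'h', 'h'], ['G', 'O', 'x']]): A raises ValueError, B raises ValueError
import Mathlib
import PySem

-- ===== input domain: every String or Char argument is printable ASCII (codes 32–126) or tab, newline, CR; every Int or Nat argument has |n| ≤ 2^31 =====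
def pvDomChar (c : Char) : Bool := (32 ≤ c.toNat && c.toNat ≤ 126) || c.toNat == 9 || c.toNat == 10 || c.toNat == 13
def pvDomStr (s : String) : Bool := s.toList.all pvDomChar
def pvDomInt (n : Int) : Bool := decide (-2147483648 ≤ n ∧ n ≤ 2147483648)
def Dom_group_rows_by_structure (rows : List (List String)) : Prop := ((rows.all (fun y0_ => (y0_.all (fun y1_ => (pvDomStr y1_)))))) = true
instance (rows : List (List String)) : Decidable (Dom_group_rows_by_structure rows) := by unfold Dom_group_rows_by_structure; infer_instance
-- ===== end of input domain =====

-- B replaces A's deferred-flush state machine by a labeling pass plus a consecutive-key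
-- grouping pass (alternative decomposition, same O(n) cost; return value only, no mutation).

-- ===== PORT A =====
-- Python truthiness of a gruppe/ordnung variable that is None or a string
def pyTruthy (o : Option String) : Bool := match o with | none => false | some s => s ≠ ""
-- Python `s != v` where v is None or a string
def pyNeqOpt (s : String) (o : Option String) : Bool := match o with | none => true | some t => s ≠ t

structure StA where
  grouped : List (String × (List (String × (List (String × String × String)))))
  cg : Option String
  co : Option String
  gr : List (String × (List (String × String × String)))
  orr : List (String × String × String)

def stepA (st : StA) (row : List String) : StA :=
  match row with
  | [mg, om, em, au, mi] =>
    let st' :=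
      if mg ≠ "" && pyNeqOpt mg st.cg then
        -- finalize previous group, start new one
        { grouped := if pyTruthy st.cg then
                       st.grouped ++ [(st.cg.getD "",
                         if st.orr ≠ [] then st.gr ++ [(st.co.getD "", st.orr)] else st.gr)]
                     else st.grouped,
          cg := some mg, co := some om, gr := [], orr := [] }
      else if om ≠ "" && pyNeqOpt om st.co then
        { grouped := st.grouped, cg := st.cg, co := some om,
          gr := if st.orr ≠ [] then st.gr ++ [(st.co.getD "", st.orr)] else st.gr,
          orr := [] }
      else st
    { st' with orr := st'.orr ++ [(em, au, mi)] }
  | _ => st  -- unreachable under Pre_ (Python raises on rows of length ≠ 5)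

def finalizeA (st : StA) : List (String × (List (String × (List (String × String × String))))) :=
  if pyTruthy st.cg then
    st.grouped ++ [(st.cg.getD "",
      if st.orr ≠ [] then st.gr ++ [(st.co.getD "", st.orr)] else st.gr)]
  else st.grouped

def group_rows_by_structure (rows : List (List String)) : List (String × (List (String × (List (String × String × String))))) :=
  finalizeA ((PySem.List.slice rows (some 1) none).foldl stepA ⟨[], none, none, [], []⟩)

-- ===== PORT B =====
structure StL where
  gruppe : Option String
  ordnung : Option String
  labeled : List (String × String × (String × String × String))

def stepL (st : StL) (row : List String) : StL :=
  match row with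
  | [mg, om, em, au, mi] =>
    let st' :=
      if mg ≠ "" && pyNeqOpt mg st.gruppe then
        { st with gruppe := some mg, ordnung := some om }
      else if om ≠ "" && pyNeqOpt om st.ordnung then
        { st with ordnung := some om }
      else st
    if pyTruthy st'.gruppe then
      { st' with labeled := st'.labeled ++ [(st'.gruppe.getD "", st'.ordnung.getD "", (em, au, mi))] }
    else st'
  | _ => st  -- unreachable under Pre_

def addBucket (buckets : List (String × (List (String × String × String)))) (o : String)
    (d : String × String × String) : List (String × (List (String × String × String))) :=
  match buckets.getLast? with
  | none => buckets ++ [(o, [d])]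
  | some (lo, rs) => if lo ≠ o then buckets ++ [(o, [d])]
                     else buckets.dropLast ++ [(lo, rs ++ [d])]

def pass2step (grouped : List (String × (List (String × (List (String × String × String))))))
    (x : String × String × (String × String × String)) :
    List (String × (List (String × (List (String × String × String))))) :=
  match grouped.getLast? with
  | none => grouped ++ [(x.1, addBucket [] x.2.1 x.2.2)]
  | some (lg, bs) => if lg ≠ x.1 then grouped ++ [(x.1, addBucket [] x.2.1 x.2.2)]
                     else grouped.dropLast ++ [(lg, addBucket bs x.2.1 x.2.2)]

def group_rows_by_structure_alt (rows : List (List String)) : List (String × (List (String × (List (String × String × String))))) :=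
  (((PySem.List.slice rows (some 1) none).foldl stepL ⟨none, none, []⟩).labeled).foldl pass2step []

-- ===== PRECONDITION & SPEC =====
-- Pre_ excludes exactly the inputs where Python A raises ValueError: a non-header row
-- whose length is not 5 (tuple unpacking fails); B raises there too.
def Pre_group_rows_by_structure (rows : List (List String)) : Prop :=
  ∀ row ∈ rows.drop 1, row.length = 5

instance (rows : List (List String)) : Decidable (Pre_group_rows_by_structure rows) := by
  unfold Pre_group_rows_by_structure; infer_instance

def pvWitness_group_rows_by_structure : List (List String) :=
  [["h", "h", "h", "h", "h"], ["G", "O", "x", "y", "z"], ["", "", "a", "b", "c"]]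

def Spec_group_rows_by_structure (rows : List (List String)) (out : List (String × (List (String × (List (String × String × String)))))) : Prop := out = group_rows_by_structure_alt rows
instance (rows : List (List String)) (out : List (String × (List (String × (List (String × String × String)))))) : Decidable (Spec_group_rows_by_structure rows out) := by unfold Spec_group_rows_by_structure; exact @instDecidableEqList _ (@instDecidableEqProd _ _ _ (@instDecidableEqList _ (@instDecidableEqProd _ _ _ inferInstance))) _ _

-- ===== CLAIM (what is proved, stated in full; the proofs are below) =====
def Claim_equal_group_rows_by_structure : Prop := ∀ (rows : List (List String)), Dom_group_rows_by_structure rows → Pre_group_rows_by_structure rows → Spec_group_rows_by_structure rows (group_rows_by_structure rows)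

-- ===== LEMMAS AND PROOFS =====

-- The invariant tying A's state-machine state to B's labeling state after the same prefix.
def InvAB (sa : StA) (sb : StL) : Prop :=
  sb.gruppe = sa.cg ∧ sb.ordnung = sa.co ∧
  sb.labeled.foldl pass2step [] = finalizeA sa ∧
  (pyTruthy sa.cg = true → sa.orr ≠ []) ∧
  (pyTruthy sa.cg = false → sa.cg = none ∧ sa.grouped = [] ∧ sb.labeled = [])

theorem inv_init : InvAB ⟨[], none, none, [], []⟩ ⟨none, none, []⟩ := by
  refine ⟨rfl, rfl, rfl, ?_, fun _ => ⟨rfl, rfl, rfl⟩⟩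
  intro h; simp [pyTruthy] at h

theorem inv_step (sa : StA) (sb : StL) (row : List String) (h : InvAB sa sb) :
    InvAB (stepA sa row) (stepL sb row) := by
  obtain ⟨G, cg, co, gr, orr⟩ := sa
  obtain ⟨bg, bo, lab⟩ := sb
  obtain ⟨hg, ho, hlab, horr, hnone⟩ := h
  dsimp only at hg ho hlab horr hnone
  subst hg; subst ho
  rcases row with _ | ⟨mg, _ | ⟨om, _ | ⟨em, _ | ⟨au, _ | ⟨mi, _ | ⟨x, xs⟩⟩⟩⟩⟩⟩
  case nil => exact ⟨rfl, rfl, hlab, horr, hnone⟩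
  case cons.nil => exact ⟨rfl, rfl, hlab, horr, hnone⟩
  case cons.cons.nil => exact ⟨rfl, rfl, hlab, horr, hnone⟩
  case cons.cons.cons.nil => exact ⟨rfl, rfl, hlab, horr, hnone⟩
  case cons.cons.cons.cons.nil => exact ⟨rfl, rfl, hlab, horr, hnone⟩
  case cons.cons.cons.cons.cons.cons => exact ⟨rfl, rfl, hlab, horr, hnone⟩
  -- the real case: a 5-element row
  by_cases h1 : (mg ≠ "" && pyNeqOpt mg bg) = true
  · -- case 1: a new group starts
    simp only [stepA, stepL, h1, if_pos]
    rw [Bool.and_eq_true] at h1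
    obtain ⟨hmg', hne⟩ := h1
    have hmg : mg ≠ "" := by simpa using hmg'
    have ht : pyTruthy (some mg) = true := by simp [pyTruthy, hmg]
    simp only [ht, if_pos, Option.getD_some]
    refine ⟨rfl, rfl, ?_, by intro _; simp, by intro hf; rw [ht] at hf; cases hf⟩
    rw [List.foldl_append, hlab]
    by_cases hb : pyTruthy bg = true
    · rcases bg with _ | s
      · simp [pyTruthy] at hb
      · have hmgs : s ≠ mg := fun e => (by simp [pyNeqOpt, e] at hne)
        have ho : orr ≠ [] := horr hb
        simp [finalizeA, pass2step, addBucket, hb, ho, hmgs, ht]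
    · obtain ⟨hbg, hG, hlabnil⟩ := hnone (by simpa using hb)
      subst hbg; subst hG; subst hlabnil
      simp [finalizeA, pass2step, addBucket, pyTruthy, hmg]
  · by_cases h2 : (om ≠ "" && pyNeqOpt om bo) = true
    · -- case 2: a new ordnung starts within the current (possibly absent) group
      simp only [stepA, stepL, h1, h2, if_neg, Bool.false_eq_true, not_false_iff, if_pos]
      rw [Bool.and_eq_true] at h2
      obtain ⟨hom', hneo⟩ := h2
      have hom : om ≠ "" := by simpa using hom'
      have hko : bo.getD "" ≠ om := by
        rcases bo with _ | t
        · exact fun e => hom e.symm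
        · intro e
          simp only [Option.getD_some] at e
          simp [pyNeqOpt, e.symm] at hneo
      by_cases hb : pyTruthy bg = true
      · rcases bg with _ | s
        · simp [pyTruthy] at hb
        · have ho : orr ≠ [] := horr hb
          have hs : pyTruthy (some s) = true := hb
          simp only [hs, if_pos]
          refine ⟨rfl, rfl, ?_, by intro _; simp, by intro hf; rw [hs] at hf; cases hf⟩
          rw [List.foldl_append, hlab]
          simp [finalizeA, pass2step, addBucket, hs, ho, hko]
      · obtain ⟨hbg, hG, hlabnil⟩ := hnone (by simpa using hb)
        subst hbg; subst hG; subst hlabnil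
        have hbf : pyTruthy (none : Option String) = false := rfl
        simp only [hbf, Bool.false_eq_true, if_neg, not_false_iff]
        refine ⟨rfl, rfl, ?_, ?_, ?_⟩
        · simp only [finalizeA, pyTruthy] at hlab ⊢; exact hlab
        · intro hf; simp [pyTruthy] at hf
        · intro _; exact ⟨rfl, rfl, rfl⟩
    · -- case 3: the row joins the current ordnung
      simp only [stepA, stepL, h1, h2, if_neg, Bool.false_eq_true, not_false_iff]
      by_cases hb : pyTruthy bg = true
      · rcases bg with _ | s
        · simp [pyTruthy] at hb
        · have ho : orr ≠ [] := horr hb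
          have hs : pyTruthy (some s) = true := hb
          simp only [hs, if_pos]
          refine ⟨rfl, rfl, ?_, by intro _; simp, by intro hf; rw [hs] at hf; cases hf⟩
          rw [List.foldl_append, hlab]
          simp [finalizeA, pass2step, addBucket, hs, ho]
      · obtain ⟨hbg, hG, hlabnil⟩ := hnone (by simpa using hb)
        subst hbg; subst hG; subst hlabnil
        have hbf : pyTruthy (none : Option String) = false := rfl
        simp only [hbf, Bool.false_eq_true, if_neg, not_false_iff]
        refine ⟨rfl, rfl, ?_, ?_, ?_⟩
        · simp only [finalizeA, pyTruthy] at hlab ⊢; exact hlab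
        · intro hf; simp [pyTruthy] at hf
        · intro _; exact ⟨rfl, rfl, rfl⟩

theorem inv_fold (l : List (List String)) (sa : StA) (sb : StL) (h : InvAB sa sb) :
    InvAB (l.foldl stepA sa) (l.foldl stepL sb) := by
  induction l generalizing sa sb with
  | nil => exact h
  | cons r t ih => exact ih _ _ (inv_step _ _ _ h)

-- ===== VERDICT (by name: the statement is the Claim_ definition above) =====
theorem group_rows_by_structure_spec : Claim_equal_group_rows_by_structure := by
  intro rows _ _
  unfold Spec_group_rows_by_structure group_rows_by_structure group_rows_by_structure_alt
  exact ((inv_fold (PySem.List.slice rows (some 1) none) _ _ inv_init).2.2.1).symm
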